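-- pv_equiv track=rewrite | github.com/CUNY-AI-Lab/pdf-accessibility-app | backend/app/services/roundtrip_compare.py | _split_alpha_digit_boundaries
-- ===== SOURCE A (Python) =====
-- def _split_alpha_digit_boundaries(value: str) -> str:
--     if not value:
--         return ""
--
--     parts: list[str] = []
--     previous = ""
--     for character in value:
--         if previous and (
--             (previous.isalpha() and character.isdigit())
--             or (previous.isdigit() and character.isalpha())
--         ):
--             parts.append(" ")
--         parts.append(character)
--         previous = character
--     return "".join(parts)
-- ===== SOURCE B (Python) =====
-- def _split_alpha_digit_boundaries(value: str) -> str: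
--     ALPHA, DIGIT, OTHER = 0, 1, 2
--
--     def classify(c: str) -> int:
--         if c.isalpha():
--             return ALPHA
--         if c.isdigit():
--             return DIGIT
--         return OTHER
--
--     # Stage 1: group the string into maximal runs of equal category.
--     runs: list[tuple[int, str]] = []
--     cur_key = None
--     cur: list[str] = []
--     for c in value:
--         k = classify(c)
--         if k == cur_key:
--             cur.append(c)
--         else:
--             if cur:
--                 runs.append((cur_key, "".join(cur)))
--             cur_key, cur = k, [c]
--     if cur:
--         runs.append((cur_key, "".join(cur)))
--
--     # Stage 2: concatenate runs, a single space between adjacent alpha/digit runs.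
--     out: list[str] = []
--     prev_key = None
--     for k, text in runs:
--         if (prev_key == ALPHA and k == DIGIT) or (prev_key == DIGIT and k == ALPHA):
--             out.append(" ")
--         out.append(text)
--         prev_key = k
--     return "".join(out)
-- ===== Notes on version B (the rewrite author's own statement) =====
-- stated objective: alternative
-- what changed: Replaces A's single character-by-character pass tracking the previous character with a two-stage run-length decomposition: first group the string into maximal runs of one category (alpha/digit/other), then concatenate the runs inserting a space exactly between adjacent alpha and digit runs.
import Mathlib
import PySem

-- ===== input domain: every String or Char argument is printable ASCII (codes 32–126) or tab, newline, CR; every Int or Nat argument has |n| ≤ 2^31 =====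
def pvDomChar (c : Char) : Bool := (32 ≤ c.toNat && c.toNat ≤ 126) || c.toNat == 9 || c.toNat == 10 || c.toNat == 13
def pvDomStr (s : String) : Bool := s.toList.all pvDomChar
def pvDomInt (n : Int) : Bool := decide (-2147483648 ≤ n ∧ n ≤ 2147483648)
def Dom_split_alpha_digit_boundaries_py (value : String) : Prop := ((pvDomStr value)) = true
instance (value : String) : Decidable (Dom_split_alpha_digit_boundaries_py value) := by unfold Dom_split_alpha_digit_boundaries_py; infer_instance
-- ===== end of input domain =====

-- B replaces A's single previous-character pass by a two-stage run-length decomposition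
-- (group into maximal alpha/digit/other runs, then join runs with spaces); objective: alternative, same O(n) cost.


-- ===== PORT A =====
-- the for-loop of A: state = (parts so far, previous character; none = "")
def pvALoop : List Char → List Char → Option Char → List Char
  | [], parts, _ => parts
  | c :: rest, parts, prev =>
    let parts :=
      match prev with
      | some p =>
          if (PySem.Chars.isalpha p && PySem.Chars.isdigit c)
              || (PySem.Chars.isdigit p && PySem.Chars.isalpha c)
          then parts ++ [' '] else parts
      | none => parts
    pvALoop rest (parts ++ [c]) (some c)

def split_alpha_digit_boundaries_py (value : String) : String :=
  if value.toList = [] then ""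
  else String.ofList (pvALoop value.toList [] none)

-- ===== PORT B =====
-- B's classify: 0 = alpha, 1 = digit, 2 = other
def pvClassify (c : Char) : Nat :=
  if PySem.Chars.isalpha c then 0 else if PySem.Chars.isdigit c then 1 else 2

-- B's stage 1 loop: extend the current run (key, chars) or flush it and start a new one
def pvRuns : List Char → Nat → List Char → List (Nat × List Char)
  | [], ck, cur => [(ck, cur)]
  | c :: rest, ck, cur =>
    let k := pvClassify c
    if k = ck then pvRuns rest ck (cur ++ [c])
    else (ck, cur) :: pvRuns rest k [c]

-- B's stage-2 space test: previous run key vs current run key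
def pvSpace (prev : Option Nat) (k : Nat) : Bool :=
  match prev with
  | some p => (p == 0 && k == 1) || (p == 1 && k == 0)
  | none => false

-- B's stage 2 loop: concatenate runs, a space between adjacent alpha/digit runs
def pvJoinRuns : List (Nat × List Char) → Option Nat → List Char
  | [], _ => []
  | (k, text) :: rest, prev =>
    (if pvSpace prev k then [' '] else []) ++ text ++ pvJoinRuns rest (some k)

def split_alpha_digit_boundaries_py_alt (value : String) : String :=
  match value.toList with
  | [] => ""
  | c :: rest => String.ofList (pvJoinRuns (pvRuns rest (pvClassify c) [c]) none)

-- ===== PRECONDITION & SPEC =====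
def Spec_split_alpha_digit_boundaries_py (value : String) (out : String) : Prop := out = split_alpha_digit_boundaries_py_alt value
instance (value : String) (out : String) : Decidable (Spec_split_alpha_digit_boundaries_py value out) := by unfold Spec_split_alpha_digit_boundaries_py; infer_instance

-- ===== CLAIM (what is proved, stated in full; the proofs are below) =====
def Claim_equal_split_alpha_digit_boundaries_py : Prop := ∀ (value : String), Dom_split_alpha_digit_boundaries_py value → Spec_split_alpha_digit_boundaries_py value (split_alpha_digit_boundaries_py value)

-- ===== LEMMAS AND PROOFS =====

def pvBoundary (a b : Char) : Bool :=
  (PySem.Chars.isalpha a && PySem.Chars.isdigit b)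
    || (PySem.Chars.isdigit a && PySem.Chars.isalpha b)

-- the characters A emits after a previous character p over the remaining input
def pvTail (p : Char) : List Char → List Char
  | [] => []
  | c :: rest => (if pvBoundary p c then [' ', c] else [c]) ++ pvTail c rest

theorem pvALoop_eq (rest : List Char) : ∀ (acc : List Char) (p : Char),
    pvALoop rest acc (some p) = acc ++ pvTail p rest := by
  induction rest with
  | nil => intro acc p; simp [pvALoop, pvTail]
  | cons c rs ih =>
      intro acc p
      simp only [pvALoop, pvTail, pvBoundary, ih]
      split <;> simp

theorem pv_alpha_digit_disjoint (c : Char) :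
    ¬ (PySem.Chars.isalpha c = true ∧ PySem.Chars.isdigit c = true) := by
  have h0 : ('0').val.toNat = 48 := rfl
  have h9 : ('9').val.toNat = 57 := rfl
  have hA : ('A').val.toNat = 65 := rfl
  have hZ : ('Z').val.toNat = 90 := rfl
  have ha : ('a').val.toNat = 97 := rfl
  have hz : ('z').val.toNat = 122 := rfl
  simp only [PySem.Chars.isalpha, PySem.Chars.isdigit, PySem.Chars.isupper, PySem.Chars.islower,
    Bool.or_eq_true, Bool.and_eq_true, decide_eq_true_eq, Char.le_def, not_and,
    UInt32.le_iff_toNat_le, h0, h9, hA, hZ, ha, hz]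
  intro h1 h2 h3
  rcases h1 with h | h <;> omega

-- the per-character boundary test of A equals B's run-key space test
theorem pvBoundary_eq_space (p c : Char) :
    pvBoundary p c = pvSpace (some (pvClassify p)) (pvClassify c) := by
  have hp := pv_alpha_digit_disjoint p
  have hc := pv_alpha_digit_disjoint c
  unfold pvBoundary pvSpace pvClassify
  cases hap : PySem.Chars.isalpha p <;> cases hdp : PySem.Chars.isdigit p <;>
    cases hac : PySem.Chars.isalpha c <;> cases hdc : PySem.Chars.isdigit c <;>
    simp_all

theorem pvSpace_self (k : Nat) : pvSpace (some k) k = false := by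
  simp only [pvSpace, Bool.or_eq_false_iff, Bool.and_eq_false_iff]
  constructor
  · by_cases h : k = 0 <;> simp [h]
  · by_cases h : k = 1 <;> simp [h]

theorem pvJoinRuns_pvRuns (rest : List Char) :
    ∀ (k : Nat) (cur : List Char) (prev : Option Nat) (hcur : cur ≠ []),
      (∀ c ∈ cur, pvClassify c = k) →
      pvJoinRuns (pvRuns rest k cur) prev
        = (if pvSpace prev k then [' '] else []) ++ cur ++ pvTail (cur.getLast hcur) rest := by
  induction rest with
  | nil =>
      intro k cur prev hcur _
      simp [pvRuns, pvJoinRuns, pvTail]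
  | cons c rs ih =>
      intro k cur prev hcur hall
      have hlast : pvClassify (cur.getLast hcur) = k := hall _ (List.getLast_mem hcur)
      by_cases h : pvClassify c = k
      · have hne : cur ++ [c] ≠ [] := by simp
        rw [show pvRuns (c :: rs) k cur = pvRuns rs k (cur ++ [c]) by
              simp [pvRuns, h]]
        rw [ih k (cur ++ [c]) prev hne (by
              intro x hx
              rcases List.mem_append.mp hx with hx | hx
              · exact hall _ hx
              · simp at hx; subst hx; exact h)]
        have hb : pvBoundary (cur.getLast hcur) c = false := by
          rw [pvBoundary_eq_space, hlast, h, pvSpace_self]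
        simp [pvTail, hb]
      · rw [show pvRuns (c :: rs) k cur = (k, cur) :: pvRuns rs (pvClassify c) [c] by
              simp [pvRuns, h]]
        rw [show pvJoinRuns ((k, cur) :: pvRuns rs (pvClassify c) [c]) prev
              = (if pvSpace prev k then [' '] else []) ++ cur
                ++ pvJoinRuns (pvRuns rs (pvClassify c) [c]) (some k) from by
              simp [pvJoinRuns]]
        rw [ih (pvClassify c) [c] (some k) (by simp) (by simp)]
        have hb : pvBoundary (cur.getLast hcur) c = pvSpace (some k) (pvClassify c) := by
          rw [pvBoundary_eq_space, hlast]
        simp only [pvTail, List.getLast_singleton, hb]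
        by_cases hs : pvSpace (some k) (pvClassify c) = true <;>
          by_cases ht : pvSpace prev k = true <;> simp [hs, ht]

-- ===== VERDICT (by name: the statement is the Claim_ definition above) =====
theorem split_alpha_digit_boundaries_py_spec : Claim_equal_split_alpha_digit_boundaries_py := by
  intro value _
  unfold Spec_split_alpha_digit_boundaries_py split_alpha_digit_boundaries_py split_alpha_digit_boundaries_py_alt
  cases h : value.toList with
  | nil => simp
  | cons c rest =>
      rw [if_neg (by simp)]
      show String.ofList (pvALoop (c :: rest) [] none)
        = String.ofList (pvJoinRuns (pvRuns rest (pvClassify c) [c]) none)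
      rw [pvJoinRuns_pvRuns rest (pvClassify c) [c] none (by simp) (by simp)]
      rw [show pvALoop (c :: rest) [] none = pvALoop rest ([] ++ [c]) (some c) from rfl,
        pvALoop_eq]
      simp [pvSpace]
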